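-- pv_equiv track=rewrite | github.com/altschop/luxary_goods_network | bitcoin_practice_nick/neural_network/image_processor.py | label_brand
-- ===== SOURCE A (Python) =====
-- known_brands = ["adidas", "new balance", "converse", "nike", "vans", "asics",
--                 "reebok", "puma", "dc", "prada", "gucci", "atmos", "black friday", "footshop",
--                 "under armour", "kangaroos"]
--
-- def label_brand(query):
--     q = query.lower()
--
--     if q.find("jordan") != -1 or q.find("kobe") != -1 or q.find("kyrie") != -1 or q.find("lebron") != -1 \
--             or q.find("zoom kd") != -1:
--         return known_brands.index("nike")
--
--     if q.find("yeezy") != -1 or q.find("human made") != -1: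
--         return known_brands.index("adidas")
--
--     for i in range(len(known_brands)):
--         if q.find(known_brands[i]) != -1:
--             return i
--
--     return -1
-- ===== SOURCE B (Python) =====
-- # Text-driven scan: instead of testing each pattern against the whole query,
-- # walk the positions of the lowercased query once and, at each position, do naive
-- # multi-pattern prefix matching, keeping the smallest precedence rank matched.
-- RULES = [("jordan", 3), ("kobe", 3), ("kyrie", 3), ("lebron", 3), ("zoom kd", 3),
--          ("yeezy", 0), ("human made", 0),
--          ("adidas", 0), ("new balance", 1), ("converse", 2), ("nike", 3), ("vans", 4),
--          ("asics", 5), ("reebok", 6), ("puma", 7), ("dc", 8), ("prada", 9), ("gucci", 10),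
--          ("atmos", 11), ("black friday", 12), ("footshop", 13), ("under armour", 14),
--          ("kangaroos", 15)]
--
-- def label_brand(query):
--     q = query.lower()
--     n = len(RULES)
--     best = n
--     for i in range(len(q) + 1):
--         for r in range(n):
--             if r < best and q.startswith(RULES[r][0], i):
--                 best = r
--     return RULES[best][1] if best < n else -1
-- ===== Notes on version B (the rewrite author's own statement) =====
-- stated objective: alternative
-- what changed: Replaced the three hardcoded branch blocks plus the indexed substring loop by a text-driven scan: walk every position of the lowercased query doing naive multi-pattern prefix matching against a precedence-ranked rule table, keep the minimal rank matched, and look the answer up from it.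
import Mathlib
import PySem

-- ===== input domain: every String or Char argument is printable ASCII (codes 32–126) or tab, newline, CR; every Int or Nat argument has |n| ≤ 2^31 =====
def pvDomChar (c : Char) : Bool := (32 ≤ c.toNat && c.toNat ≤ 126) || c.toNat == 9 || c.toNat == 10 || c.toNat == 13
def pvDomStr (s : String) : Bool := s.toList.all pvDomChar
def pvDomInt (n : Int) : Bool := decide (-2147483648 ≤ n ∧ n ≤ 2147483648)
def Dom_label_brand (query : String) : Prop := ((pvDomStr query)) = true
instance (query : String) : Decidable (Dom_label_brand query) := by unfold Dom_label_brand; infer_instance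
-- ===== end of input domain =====

-- B replaces A's branch blocks and substring loop by a text-driven scan: it walks the
-- positions of the lowercased query, does naive multi-pattern prefix matching against a
-- precedence-ranked rule table, keeps the minimal matched rank and looks the answer up
-- (alternative decomposition; same asymptotic cost).

-- ===== PORT A =====
def known_brands : List String :=
  ["adidas", "new balance", "converse", "nike", "vans", "asics",
   "reebok", "puma", "dc", "prada", "gucci", "atmos", "black friday", "footshop",
   "under armour", "kangaroos"]

-- A's indexed for-loop over range(len(known_brands)) with early return
def labelLoop (q : String) : List Int → Int
  | [] => -1
  | i :: rest =>
      if PySem.Str.find q ((PySem.List.pyGet? known_brands i).getD "") ≠ -1 then i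
      else labelLoop q rest

def label_brand (query : String) : Int :=
  let q := PySem.Str.lower query
  if PySem.Str.find q "jordan" ≠ -1 ∨ PySem.Str.find q "kobe" ≠ -1 ∨ PySem.Str.find q "kyrie" ≠ -1
      ∨ PySem.Str.find q "lebron" ≠ -1 ∨ PySem.Str.find q "zoom kd" ≠ -1 then
    ((PySem.List.index? known_brands "nike").getD 0 : Int)
  else if PySem.Str.find q "yeezy" ≠ -1 ∨ PySem.Str.find q "human made" ≠ -1 then
    ((PySem.List.index? known_brands "adidas").getD 0 : Int)
  else
    labelLoop q (PySem.List.pyRange 0 (known_brands.length) 1)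

-- ===== PORT B =====
def bRules : List (String × Int) :=
  [("jordan", 3), ("kobe", 3), ("kyrie", 3), ("lebron", 3), ("zoom kd", 3),
   ("yeezy", 0), ("human made", 0),
   ("adidas", 0), ("new balance", 1), ("converse", 2), ("nike", 3), ("vans", 4),
   ("asics", 5), ("reebok", 6), ("puma", 7), ("dc", 8), ("prada", 9), ("gucci", 10),
   ("atmos", 11), ("black friday", 12), ("footshop", 13), ("under armour", 14),
   ("kangaroos", 15)]

-- hand-ported exactly: q.startswith(pat, i) with 0 ≤ i ≤ len(q) is "pat is a prefix of q[i:]";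
-- the loop indices of range(…) are nonnegative, so they are carried as Nat.
def label_brand_alt (query : String) : Int :=
  let q := (PySem.Str.lower query).toList
  let n := bRules.length
  let best := (List.range (q.length + 1)).foldl
    (fun best i => (List.range n).foldl
        (fun b r => if r < b ∧ ((bRules[r]?.getD ("", 0)).1.toList.isPrefixOf (q.drop i)) then r else b)
        best) n
  if best < n then (bRules[best]?.getD ("", 0)).2 else -1

-- ===== PRECONDITION & SPEC =====
def Spec_label_brand (query : String) (out : Int) : Prop := out = label_brand_alt query
instance (query : String) (out : Int) : Decidable (Spec_label_brand query out) := by unfold Spec_label_brand; infer_instance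

-- ===== CLAIM (what is proved, stated in full; the proofs are below) =====
def Claim_equal_label_brand : Prop := ∀ (query : String), Dom_label_brand query → Spec_label_brand query (label_brand query)

-- ===== LEMMAS AND PROOFS =====

-- first index >= k (within the next n) where f holds, else k + n
def leastFrom (f : Nat -> Bool) : Nat -> Nat -> Nat
  | 0, k => k
  | n + 1, k => if f k then k else leastFrom f n (k + 1)

-- A's result, abstracted: first (pattern, idx) of the table whose pattern occurs in q
def firstMatch (q : String) : List (String × Int) -> Int
  | [] => -1
  | (pat, idx) :: rest => if PySem.Str.isIn pat q then idx else firstMatch q rest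

theorem firstMatch_cons (q : String) (x : String × Int) (rest : List (String × Int)) :
    firstMatch q (x :: rest) = if PySem.Str.isIn x.1 q then x.2 else firstMatch q rest := by
  rcases x with ⟨p, i⟩; rfl

theorem leastFrom_le (f : Nat -> Bool) : ∀ n k, leastFrom f n k ≤ k + n := by
  intro n
  induction n with
  | zero => intro k; simp [leastFrom]
  | succ n ih =>
      intro k
      simp only [leastFrom]
      split
      · omega
      · have := ih (k + 1); omega

theorem leastFrom_true (f : Nat -> Bool) :
    ∀ n k, leastFrom f n k < k + n -> f (leastFrom f n k) = true := by
  intro n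
  induction n with
  | zero => intro k h; simp [leastFrom] at h
  | succ n ih =>
      intro k h
      simp only [leastFrom] at h ⊢
      by_cases hfk : f k = true
      · simp [hfk]
      · rw [if_neg hfk] at h ⊢
        exact ih (k + 1) (by omega)

theorem leastFrom_min (f : Nat -> Bool) :
    ∀ n k r, k ≤ r -> f r = true -> leastFrom f n k ≤ r := by
  intro n
  induction n with
  | zero => intro k r hk _; simpa [leastFrom]
  | succ n ih =>
      intro k r hk hr
      simp only [leastFrom]
      split
      · exact hk
      · rename_i hfk
        have : k ≠ r := by rintro rfl; simp [hr] at hfk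
        exact ih (k + 1) r (by omega) hr

theorem fold_stop (f : Nat -> Bool) :
    ∀ n k b, b ≤ k ->
      (List.range' k n).foldl (fun b r => if r < b ∧ f r then r else b) b = b := by
  intro n
  induction n with
  | zero => intro k b _; simp
  | succ n ih =>
      intro k b hb
      rw [List.range'_succ, List.foldl_cons]
      have : ¬ (k < b ∧ f k) := by rintro ⟨h, _⟩; omega
      rw [if_neg this]
      exact ih (k + 1) b (by omega)

theorem fold_inner (f : Nat -> Bool) :
    ∀ n k b, b ≤ k + n ->
      (List.range' k n).foldl (fun b r => if r < b ∧ f r then r else b) b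
        = min b (leastFrom f n k) := by
  intro n
  induction n with
  | zero => intro k b hb; simp [leastFrom]; omega
  | succ n ih =>
      intro k b hb
      rw [List.range'_succ, List.foldl_cons]
      by_cases hfk : f k = true
      · have h1 : (if k < b ∧ f k then k else b) = min b k := by
          by_cases h : k < b <;> simp [h, hfk] <;> omega
        rw [h1, fold_stop f n (k + 1) (min b k) (by omega)]
        simp [leastFrom, hfk]
      · have h1 : (if k < b ∧ f k then k else b) = b := by simp [hfk]
        rw [h1, ih (k + 1) b (by omega)]
        simp [leastFrom, hfk]

theorem fold_outer (F : Nat -> Nat -> Bool) (N : Nat) :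
    ∀ (l : List Nat) (b : Nat), b ≤ N ->
      l.foldl (fun best i =>
          (List.range' 0 N).foldl (fun b r => if r < b ∧ F i r then r else b) best) b
        = l.foldl (fun b i => min b (leastFrom (F i) N 0)) b := by
  intro l
  induction l with
  | nil => intro b _; rfl
  | cons i l ih =>
      intro b hb
      rw [List.foldl_cons, List.foldl_cons, fold_inner (F i) N 0 b (by omega)]
      exact ih _ (by have := leastFrom_le (F i) N 0; omega)

theorem foldl_min_le_init (g : Nat -> Nat) :
    ∀ (l : List Nat) (b : Nat), l.foldl (fun b i => min b (g i)) b ≤ b := by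
  intro l
  induction l with
  | nil => intro b; simp
  | cons i l ih => intro b; rw [List.foldl_cons]; exact le_trans (ih _) (by omega)

theorem foldl_min_le_elem (g : Nat -> Nat) :
    ∀ (l : List Nat) (b i : Nat), i ∈ l -> l.foldl (fun b i => min b (g i)) b ≤ g i := by
  intro l
  induction l with
  | nil => intro b i h; simp at h
  | cons j l ih =>
      intro b i h
      rw [List.foldl_cons]
      rcases List.mem_cons.mp h with rfl | h
      · exact le_trans (foldl_min_le_init g l _) (by omega)
      · exact ih _ i h

theorem le_foldl_min (g : Nat -> Nat) :
    ∀ (l : List Nat) (b c : Nat), c ≤ b -> (∀ i ∈ l, c ≤ g i) ->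
      c ≤ l.foldl (fun b i => min b (g i)) b := by
  intro l
  induction l with
  | nil => intro b c hc _; simpa
  | cons i l ih =>
      intro b c hc h
      rw [List.foldl_cons]
      exact ih _ c (le_min hc (h i (List.mem_cons_self ..))) (fun j hj => h j (List.mem_cons_of_mem _ hj))

theorem min_least (N : Nat) (l : List Nat) (F : Nat -> Nat -> Bool) :
    l.foldl (fun b i => min b (leastFrom (F i) N 0)) N
      = leastFrom (fun r => l.any (fun i => F i r)) N 0 := by
  set G : Nat -> Bool := fun r => l.any (fun i => F i r) with hGdef
  apply Nat.le_antisymm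
  · by_cases h : leastFrom G N 0 < N
    · have hG : G (leastFrom G N 0) = true := leastFrom_true G N 0 (by omega)
      obtain ⟨i, hi, hFi⟩ := List.any_eq_true.mp hG
      have h1 : l.foldl (fun b i => min b (leastFrom (F i) N 0)) N ≤ leastFrom (F i) N 0 :=
        foldl_min_le_elem (fun i => leastFrom (F i) N 0) l N i hi
      have h2 : leastFrom (F i) N 0 ≤ leastFrom G N 0 :=
        leastFrom_min (F i) N 0 (leastFrom G N 0) (Nat.zero_le _) hFi
      omega
    · have h2 := leastFrom_le G N 0
      have h3 := foldl_min_le_init (fun i => leastFrom (F i) N 0) l N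
      omega
  · apply le_foldl_min
    · have := leastFrom_le G N 0; omega
    · intro i hi
      by_cases h : leastFrom (F i) N 0 < N
      · have hf : F i (leastFrom (F i) N 0) = true := leastFrom_true (F i) N 0 (by omega)
        have hG : G (leastFrom (F i) N 0) = true := List.any_eq_true.mpr ⟨i, hi, hf⟩
        exact leastFrom_min G N 0 _ (Nat.zero_le _) hG
      · have h1 := leastFrom_le G N 0
        omega

-- "pat in q" is exactly "q startswith pat at some position 0..len(q)"
theorem isIn_eq_any (p q : String) :
    PySem.Str.isIn p q
      = (List.range (q.toList.length + 1)).any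
          (fun i => p.toList.isPrefixOf (q.toList.drop i)) := by
  rw [Bool.eq_iff_iff, PySem.Str.isIn_iff_infix, List.any_eq_true]
  constructor
  · rintro ⟨s, t, h⟩
    have hlen := congrArg List.length h
    rw [List.length_append, List.length_append] at hlen
    refine ⟨s.length, List.mem_range.mpr (by omega), ?_⟩
    rw [List.isPrefixOf_iff_prefix, ← h, List.append_assoc, List.drop_left]
    exact ⟨t, rfl⟩
  · rintro ⟨i, -, hp⟩
    exact (List.isPrefixOf_iff_prefix.mp hp).isInfix.trans (List.drop_suffix i q.toList).isInfix

-- A's precedence chain equals the leastFrom lookup on the same table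
theorem first_least (q : String) (tbl : List (String × Int)) :
    ∀ n k, n = tbl.length - k -> k ≤ tbl.length ->
      firstMatch q (tbl.drop k)
        = (if leastFrom (fun r => PySem.Str.isIn ((tbl[r]?.getD ("", 0)).1) q) n k < tbl.length
           then (tbl[leastFrom (fun r => PySem.Str.isIn ((tbl[r]?.getD ("", 0)).1) q) n k]?.getD ("", 0)).2
           else -1) := by
  intro n
  induction n with
  | zero =>
      intro k hn hk
      have hk' : tbl.length = k := by omega
      rw [List.drop_of_length_le (by omega)]
      simp [firstMatch, leastFrom, hk']
  | succ n ih =>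
      intro k hn hk
      have hklt : k < tbl.length := by omega
      have hget : tbl[k]?.getD ("", 0) = tbl[k] := by simp [List.getElem?_eq_getElem hklt]
      rw [List.drop_eq_getElem_cons hklt, firstMatch_cons]
      simp only [leastFrom, hget]
      by_cases hin : PySem.Str.isIn tbl[k].1 q = true
      · simp only [if_pos hin]
        rw [if_pos hklt, List.getElem?_eq_getElem hklt]
        rfl
      · simp only [if_neg hin]
        exact ih (k + 1) (by omega) (by omega)

theorem ite_or_int {a b : Prop} [Decidable a] [Decidable b] (x y : Int) :
    (if a ∨ b then x else y) = if a then x else if b then x else y := by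
  by_cases ha : a <;> by_cases hb : b <;> simp [ha, hb]

theorem find_ne_iff_isIn (q p : String) :
    (PySem.Str.find q p ≠ -1) ↔ PySem.Str.isIn p q = true := by
  rw [PySem.Str.find_ne_neg_one_iff, PySem.Str.isIn_iff_infix]

-- A = firstMatch over the rule table (unfolds A's branches and its 16-step loop)
theorem A_first (query : String) :
    label_brand query = firstMatch (PySem.Str.lower query) bRules := by
  have hr : PySem.List.pyRange 0 (known_brands.length) 1 =
      [0,1,2,3,4,5,6,7,8,9,10,11,12,13,14,15] := by decide
  have hnike : (((PySem.List.index? known_brands "nike").getD 0 : Nat) : Int) = 3 := by decide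
  have hadidas : (((PySem.List.index? known_brands "adidas").getD 0 : Nat) : Int) = 0 := by decide
  have g0 : (PySem.List.pyGet? known_brands 0).getD "" = "adidas" := by decide
  have g1 : (PySem.List.pyGet? known_brands 1).getD "" = "new balance" := by decide
  have g2 : (PySem.List.pyGet? known_brands 2).getD "" = "converse" := by decide
  have g3 : (PySem.List.pyGet? known_brands 3).getD "" = "nike" := by decide
  have g4 : (PySem.List.pyGet? known_brands 4).getD "" = "vans" := by decide
  have g5 : (PySem.List.pyGet? known_brands 5).getD "" = "asics" := by decide
  have g6 : (PySem.List.pyGet? known_brands 6).getD "" = "reebok" := by decide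
  have g7 : (PySem.List.pyGet? known_brands 7).getD "" = "puma" := by decide
  have g8 : (PySem.List.pyGet? known_brands 8).getD "" = "dc" := by decide
  have g9 : (PySem.List.pyGet? known_brands 9).getD "" = "prada" := by decide
  have g10 : (PySem.List.pyGet? known_brands 10).getD "" = "gucci" := by decide
  have g11 : (PySem.List.pyGet? known_brands 11).getD "" = "atmos" := by decide
  have g12 : (PySem.List.pyGet? known_brands 12).getD "" = "black friday" := by decide
  have g13 : (PySem.List.pyGet? known_brands 13).getD "" = "footshop" := by decide
  have g14 : (PySem.List.pyGet? known_brands 14).getD "" = "under armour" := by decide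
  have g15 : (PySem.List.pyGet? known_brands 15).getD "" = "kangaroos" := by decide
  simp only [label_brand, bRules, hr, firstMatch, labelLoop,
    find_ne_iff_isIn, ite_or_int, hnike, hadidas,
    g0, g1, g2, g3, g4, g5, g6, g7, g8, g9, g10, g11, g12, g13, g14, g15]

theorem label_brand_eq (query : String) : label_brand query = label_brand_alt query := by
  have hF : (fun (r : Nat) => (List.range ((PySem.Str.lower query).toList.length + 1)).any
        (fun i => (bRules[r]?.getD ("", 0)).1.toList.isPrefixOf
          (((PySem.Str.lower query).toList).drop i)))
      = (fun (r : Nat) => PySem.Str.isIn ((bRules[r]?.getD ("", 0)).1) (PySem.Str.lower query)) := by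
    funext r
    exact (isIn_eq_any ((bRules[r]?.getD ("", 0)).1) (PySem.Str.lower query)).symm
  have hbest :
      (List.range ((PySem.Str.lower query).toList.length + 1)).foldl
        (fun best i => (List.range' 0 bRules.length).foldl
          (fun b r => if r < b ∧ ((bRules[r]?.getD ("", 0)).1.toList.isPrefixOf
              (((PySem.Str.lower query).toList).drop i)) then r else b) best)
        bRules.length
      = leastFrom (fun r => PySem.Str.isIn ((bRules[r]?.getD ("", 0)).1) (PySem.Str.lower query))
          bRules.length 0 :=
    (fold_outer
        (fun (i r : Nat) => (bRules[r]?.getD ("", 0)).1.toList.isPrefixOf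
          (((PySem.Str.lower query).toList).drop i))
        bRules.length
        (List.range ((PySem.Str.lower query).toList.length + 1))
        bRules.length (le_refl _)).trans
      ((min_least bRules.length
          (List.range ((PySem.Str.lower query).toList.length + 1))
          (fun (i r : Nat) => (bRules[r]?.getD ("", 0)).1.toList.isPrefixOf
            (((PySem.Str.lower query).toList).drop i))).trans
        (congrArg (fun f => leastFrom f bRules.length 0) hF))
  have hkey : label_brand_alt query =
      (if leastFrom (fun r => PySem.Str.isIn ((bRules[r]?.getD ("", 0)).1) (PySem.Str.lower query))
            bRules.length 0 < bRules.length
       then (bRules[leastFrom (fun r => PySem.Str.isIn ((bRules[r]?.getD ("", 0)).1)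
              (PySem.Str.lower query)) bRules.length 0]?.getD ("", 0)).2
       else -1) := by
    show (if (List.range ((PySem.Str.lower query).toList.length + 1)).foldl
        (fun best i => (List.range bRules.length).foldl
          (fun b r => if r < b ∧ ((bRules[r]?.getD ("", 0)).1.toList.isPrefixOf
              (((PySem.Str.lower query).toList).drop i)) then r else b) best)
        bRules.length < bRules.length
      then (bRules[(List.range ((PySem.Str.lower query).toList.length + 1)).foldl
        (fun best i => (List.range bRules.length).foldl
          (fun b r => if r < b ∧ ((bRules[r]?.getD ("", 0)).1.toList.isPrefixOf
              (((PySem.Str.lower query).toList).drop i)) then r else b) best)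
        bRules.length]?.getD ("", 0)).2
      else -1) = _
    rw [List.range_eq_range' (n := bRules.length), hbest]
  rw [A_first, hkey]
  have h := first_least (PySem.Str.lower query) bRules bRules.length 0 (by simp) (Nat.zero_le _)
  rw [List.drop_zero] at h
  exact h

-- ===== VERDICT (by name: the statement is the Claim_ definition above) =====
theorem label_brand_spec : Claim_equal_label_brand := by
  intro query _
  exact label_brand_eq query
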